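-- pv_equiv track=rewrite | github.com/nirutthyu/EduPortal | transcript.py | parse_roadmap
-- ===== SOURCE A (Python) =====
-- def parse_roadmap(roadmap):
--     weeks = {}
--     current_week = None
--     for line in roadmap.split("\n"):
--         line = line.strip()
--         if line.lower().startswith("week"):
--             current_week = line.split(":")[0].strip()
--             weeks[current_week] = []
--         elif line.startswith("-") and current_week:
--             topic = line[1:].strip()
--             weeks[current_week].append(topic)
--     return weeks
-- ===== SOURCE B (Python) =====
-- def parse_roadmap(roadmap):
--     # Phase 1: chunk the stripped lines into (header-key, body-lines) sections.
--     lines = [ln.strip() for ln in roadmap.split("\n")]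
--     sections = []
--     for line in lines:
--         if line.lower().startswith("week"):
--             sections.append((line.split(":")[0].strip(), []))
--         elif sections:
--             sections[-1][1].append(line)
--     # Phase 2: extract the topics of each section; assignment in section order
--     # makes a later duplicate week header overwrite an earlier one, as in A.
--     weeks = {}
--     for key, body in sections:
--         weeks[key] = [ln[1:].strip() for ln in body if ln.startswith("-")]
--     return weeks
-- ===== Notes on version B (the rewrite author's own statement) =====
-- stated objective: alternative
-- what changed: A interleaves parsing and dict mutation in one stateful pass (current-week pointer, append into the dict); B first chunks the stripped lines into (header, body) sections, then builds each week's topic list with a filter/map comprehension and assigns it once per section.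
import Mathlib
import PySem

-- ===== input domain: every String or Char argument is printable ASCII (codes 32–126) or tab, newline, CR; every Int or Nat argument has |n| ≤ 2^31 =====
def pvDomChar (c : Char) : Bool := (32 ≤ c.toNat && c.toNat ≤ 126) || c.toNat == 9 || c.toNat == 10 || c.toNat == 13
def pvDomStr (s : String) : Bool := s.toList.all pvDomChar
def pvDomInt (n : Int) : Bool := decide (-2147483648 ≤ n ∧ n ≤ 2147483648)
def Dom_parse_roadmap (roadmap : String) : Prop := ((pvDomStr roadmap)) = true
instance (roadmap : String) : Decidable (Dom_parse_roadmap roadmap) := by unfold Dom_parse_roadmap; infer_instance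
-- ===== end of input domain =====

-- B re-decomposes A's single stateful pass (current-week pointer, append into the dict) into
-- chunking-into-sections followed by a per-section filter/map ("alternative"; same O(n) cost).

-- ===== PORT A =====
-- one iteration of A's loop: state = (weeks dict, current_week)
def pvStepA (s : PySem.Dict String (List String) × Option String) (line0 : String) :
    PySem.Dict String (List String) × Option String :=
  let line := PySem.Str.strip line0
  if PySem.Str.startswith (PySem.Str.lower line) "week" then
    let cw := PySem.Str.strip (((PySem.Str.split? line ":").getD []).headD "")
    (s.1.insert cw [], some cw)
  else
    match s.2 with
    | some k =>
        -- Python: `line.startswith("-") and current_week` (string truthiness = nonempty)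
        if PySem.Str.startswith line "-" && !(k == "") then
          (s.1.modify k [] (fun ts => ts ++ [PySem.Str.strip (PySem.Str.slice line (some 1) none)]), s.2)
        else s
    | none => s

def parse_roadmap (roadmap : String) : List (String × List String) :=
  (((PySem.Str.split? roadmap "\n").getD []).foldl pvStepA (PySem.Dict.empty, none)).1.items

-- ===== PORT B =====
-- phase 1 step: a header opens a fresh section, otherwise the line joins the last body
def pvStep1 (acc : List (String × List String)) (line : String) : List (String × List String) :=
  if PySem.Str.startswith (PySem.Str.lower line) "week" then
    acc ++ [(PySem.Str.strip (((PySem.Str.split? line ":").getD []).headD ""), [])]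
  else
    match acc.getLast? with
    | some (k, b) => acc.dropLast ++ [(k, b ++ [line])]
    | none => acc

-- phase 2 comprehension: the topics of one section body
def pvTopics (body : List String) : List String :=
  (body.filter (fun ln => PySem.Str.startswith ln "-")).map
    (fun ln => PySem.Str.strip (PySem.Str.slice ln (some 1) none))

def parse_roadmap_alt (roadmap : String) : List (String × List String) :=
  let lines := ((PySem.Str.split? roadmap "\n").getD []).map PySem.Str.strip
  let sections := lines.foldl pvStep1 []
  (sections.foldl (fun d p => d.insert p.1 (pvTopics p.2)) PySem.Dict.empty).items

-- ===== PRECONDITION & SPEC =====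
def Spec_parse_roadmap (roadmap : String) (out : List (String × List String)) : Prop := out = parse_roadmap_alt roadmap
instance (roadmap : String) (out : List (String × List String)) : Decidable (Spec_parse_roadmap roadmap out) := by unfold Spec_parse_roadmap; infer_instance

-- ===== CLAIM (what is proved, stated in full; the proofs are below) =====
def Claim_equal_parse_roadmap : Prop := ∀ (roadmap : String), Dom_parse_roadmap roadmap → Spec_parse_roadmap roadmap (parse_roadmap roadmap)

-- ===== LEMMAS AND PROOFS =====

-- B's phase 2 as a function of the section list (proof helper)
def pvPhase2 (secs : List (String × List String)) : PySem.Dict String (List String) :=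
  secs.foldl (fun d p => d.insert p.1 (pvTopics p.2)) PySem.Dict.empty

-- the key of the last section = A's current_week
def pvLastKey (secs : List (String × List String)) : Option String :=
  secs.getLast?.map Prod.fst

lemma pvPhase2_concat (secs : List (String × List String)) (p : String × List String) :
    pvPhase2 (secs ++ [p]) = (pvPhase2 secs).insert p.1 (pvTopics p.2) := by
  simp [pvPhase2]

lemma pvTopics_concat (b : List String) (l : String) :
    pvTopics (b ++ [l]) =
      pvTopics b ++ (if PySem.Chars.startswith l.toList ['-'] = true then
        [PySem.Str.strip (PySem.Str.slice l (some 1) none)] else []) := by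
  by_cases h : PySem.Chars.startswith l.toList ['-'] = true <;>
    simp [pvTopics, List.filter_append, PySem.Str.startswith, h]

-- a character that lowercases to 'w' is neither whitespace nor ':'
lemma pvLowerW (c : Char) (h : PySem.Chars.lowerChar c = 'w') :
    PySem.Chars.isspace c = false ∧ c ≠ ':' := by
  unfold PySem.Chars.lowerChar PySem.Chars.isupper at h
  by_cases hu : ('A' ≤ c ∧ c ≤ 'Z')
  · have h65 : 65 ≤ c.toNat := hu.1
    have h90 : c.toNat ≤ 90 := hu.2
    constructor
    · unfold PySem.Chars.isspace
      simp only [Bool.or_eq_false_iff, Bool.and_eq_false_iff, decide_eq_false_iff_not]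
      omega
    · intro hc; subst hc
      have h58 : (':').toNat = 58 := rfl
      omega
  · rw [if_neg (by simpa using hu)] at h
    subst h; exact ⟨by decide, by decide⟩

-- head of splitOn.go with a nonempty accumulator: the first piece is already fixed
lemma pvGoHeadAcc (sep : List Char) (fuel : Nat) (l cur : List Char)
    (acc : List (List Char)) (h : acc ≠ []) :
    (PySem.Chars.splitOn.go sep fuel l cur acc).head? = acc.getLast? := by
  induction fuel generalizing l cur acc with
  | zero =>
      simp [PySem.Chars.splitOn.go]
      cases acc with
      | nil => exact absurd rfl h
      | cons a as => simp [List.getLast?_cons]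
  | succ fuel ih =>
      cases l with
      | nil =>
          simp [PySem.Chars.splitOn.go]
          cases acc with
          | nil => exact absurd rfl h
          | cons a as => simp [List.getLast?_cons]
      | cons c rest =>
          rw [PySem.Chars.splitOn.go]
          split
          · rw [ih _ _ _ (by simp)]
            cases acc with
            | nil => exact absurd rfl h
            | cons a as => simp [List.getLast?_cons]
          · exact ih _ _ _ h

-- head of splitOn.go with empty accumulator starts with cur.reverse
lemma pvGoHeadNil (sep : List Char) (fuel : Nat) (l cur : List Char) :
    ∃ t, (PySem.Chars.splitOn.go sep fuel l cur []).head? = some (cur.reverse ++ t) := by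
  induction fuel generalizing l cur with
  | zero => exact ⟨l, by simp [PySem.Chars.splitOn.go]⟩
  | succ fuel ih =>
      cases l with
      | nil => exact ⟨[], by simp [PySem.Chars.splitOn.go]⟩
      | cons c rest =>
          rw [PySem.Chars.splitOn.go]
          split
          · refine ⟨[], ?_⟩
            rw [pvGoHeadAcc _ _ _ _ _ (by simp)]
            simp
          · obtain ⟨t, ht⟩ := ih rest (c :: cur)
            exact ⟨c :: t, by rw [ht]; simp⟩

-- strip of a list starting with a non-space character is nonempty
lemma pvStripNe (c : Char) (t : List Char) (h : PySem.Chars.isspace c = false) :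
    PySem.Chars.strip (c :: t) ≠ [] := by
  unfold PySem.Chars.strip PySem.Chars.lstrip PySem.Chars.rstrip
  rw [List.dropWhile_cons_of_neg (by simp [h])]
  intro hc
  rw [List.reverse_eq_nil_iff, List.dropWhile_eq_nil_iff] at hc
  have := hc c (by simp)
  rw [h] at this; exact Bool.false_ne_true this

lemma pvSplitHead (c : Char) (rest : List Char) (hc : c ≠ ':') :
    ∃ t, (PySem.Chars.splitOn (c :: rest) [':']).head? = some (c :: t) := by
  unfold PySem.Chars.splitOn
  simp only [List.length_cons]
  rw [PySem.Chars.splitOn.go]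
  rw [if_neg (by simp [List.isPrefixOf, beq_iff_eq]; intro h; exact hc h.symm)]
  obtain ⟨t, ht⟩ := pvGoHeadNil [':'] (rest.length + 1) rest [c]
  exact ⟨t, by rw [ht]; simp⟩

-- the key computed from a week-header line is a nonempty string (Python truthiness in A)
lemma pvKeyNe (l : String)
    (h : PySem.Str.startswith (PySem.Str.lower l) "week" = true) :
    ¬ PySem.Str.strip (((PySem.Str.split? l ":").getD []).headD "") = "" := by
  have hpre : "week".toList <+: PySem.Chars.lower l.toList := by
    rw [← PySem.Chars.startswith_iff]
    simpa [PySem.Str.startswith, PySem.Str.lower] using h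
  obtain ⟨c, rest, hL, hw⟩ :
      ∃ c rest, l.toList = c :: rest ∧ PySem.Chars.lowerChar c = 'w' := by
    cases hl : l.toList with
    | nil => rw [hl] at hpre; simp [PySem.Chars.lower] at hpre
    | cons c rest =>
        rw [hl] at hpre
        obtain ⟨t2, ht2⟩ := hpre
        simp [PySem.Chars.lower] at ht2
        exact ⟨c, rest, rfl, ht2.1.symm⟩
  obtain ⟨hsp, hcol⟩ := pvLowerW c hw
  obtain ⟨t, ht⟩ := pvSplitHead c rest hcol
  have hsep : PySem.Str.split? l ":" =
      some ((PySem.Chars.splitOn l.toList [':']).map String.ofList) := by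
    simp [PySem.Str.split?, PySem.Chars.split?]
  rw [hsep]
  have hhead : ((PySem.Chars.splitOn l.toList [':']).map String.ofList).headD "" =
      String.ofList (c :: t) := by
    rw [hL]
    cases hso : PySem.Chars.splitOn (c :: rest) [':'] with
    | nil => rw [hso] at ht; simp at ht
    | cons a as =>
        rw [hso] at ht
        simp at ht
        simp [ht]
  simp only [Option.getD_some, hhead]
  intro heq
  have := congrArg String.toList heq
  simp [PySem.Str.strip] at this
  exact pvStripNe c t hsp this

-- section keys stay nonempty through one phase-1 step
lemma pvStep1_keys (secs : List (String × List String)) (l : String)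
    (hk : ∀ p ∈ secs, ¬ p.1 = "") :
    ∀ p ∈ pvStep1 secs l, ¬ p.1 = "" := by
  intro p hp
  unfold pvStep1 at hp
  split at hp
  · rename_i hH
    rcases List.mem_append.1 hp with h1 | h2
    · exact hk p h1
    · simp only [List.mem_singleton] at h2
      rw [h2]
      exact pvKeyNe l hH
  · split at hp
    · rename_i k b hgl
      rcases List.mem_append.1 hp with h1 | h2
      · exact hk p ((List.dropLast_sublist _).subset h1)
      · simp only [List.mem_singleton] at h2
        rw [h2]
        exact hk (k, b) (List.mem_of_getLast? hgl)
    · exact hk p hp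

-- one step of A's loop matches one step of B's phase 1, seen through phase 2
lemma pvStepComm (secs : List (String × List String)) (l : String)
    (hk : ∀ p ∈ secs, ¬ p.1 = "") :
    pvStepA (pvPhase2 secs, pvLastKey secs) l =
      (pvPhase2 (pvStep1 secs (PySem.Str.strip l)),
       pvLastKey (pvStep1 secs (PySem.Str.strip l))) := by
  unfold pvStepA pvStep1
  by_cases hH : PySem.Str.startswith (PySem.Str.lower (PySem.Str.strip l)) "week" = true
  · rw [if_pos hH, if_pos hH, pvPhase2_concat]
    simp [pvLastKey, pvTopics]
  · rw [if_neg hH, if_neg hH]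
    rcases List.eq_nil_or_concat' secs with rfl | ⟨init, p, rfl⟩
    · simp [pvLastKey]
    · obtain ⟨k, b⟩ := p
      have hkne : ¬ k = "" := hk (k, b) (by simp)
      have hgl : (init ++ [(k, b)]).getLast? = some (k, b) := List.getLast?_concat
      simp only [pvLastKey, hgl, Option.map_some, List.dropLast_concat]
      by_cases hT : PySem.Chars.startswith (PySem.Chars.strip l.toList) ['-'] = true
      · rw [if_pos (by simp [PySem.Str.startswith, hT, hkne])]
        rw [pvPhase2_concat, pvPhase2_concat, pvTopics_concat]
        simp [hT, PySem.Dict.modify, PySem.Dict.getD_insert_self,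
          PySem.Dict.insert_insert_self]
      · rw [if_neg (by simp [PySem.Str.startswith, hT])]
        rw [pvPhase2_concat, pvPhase2_concat, pvTopics_concat]
        simp [hT]

lemma pvMain (ls : List String) (secs : List (String × List String))
    (hk : ∀ p ∈ secs, ¬ p.1 = "") :
    ls.foldl pvStepA (pvPhase2 secs, pvLastKey secs) =
      (pvPhase2 ((ls.map PySem.Str.strip).foldl pvStep1 secs),
       pvLastKey ((ls.map PySem.Str.strip).foldl pvStep1 secs)) := by
  induction ls generalizing secs with
  | nil => simp
  | cons l ls ih =>
      simp only [List.foldl_cons, List.map_cons]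
      rw [pvStepComm secs l hk]
      exact ih _ (pvStep1_keys _ _ hk)

-- ===== VERDICT (by name: the statement is the Claim_ definition above) =====
theorem parse_roadmap_spec : Claim_equal_parse_roadmap := by
  intro roadmap _
  unfold Spec_parse_roadmap parse_roadmap parse_roadmap_alt
  have h := pvMain ((PySem.Str.split? roadmap "\n").getD []) [] (by simp)
  simp only [pvPhase2, pvLastKey, List.foldl_nil, List.getLast?_nil, Option.map_none] at h
  rw [h]
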